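-- pv_equiv track=rewrite | github.com/yl-ang/CTF | HSCTF2021/Reverse/warmup-rev.py | cool
-- ===== SOURCE A (Python) =====
-- def cool(string):
--     s = ''
--     for i in range(0,len(string)):
--         if i%2 == 0:
--             s += chr(ord(string[i])-3*(i//2))
--         else:
--             s += string[i]
--     return s
-- ===== SOURCE B (Python) =====
-- def cool(string):
--     # recurse over the characters two at a time, tracking the pair number j
--     # (no index arithmetic: i%2 / i//2 disappear)
--     def go(cs, j):
--         if not cs:
--             return []
--         if len(cs) == 1:
--             return [chr(ord(cs[0]) - 3*j)]
--         return [chr(ord(cs[0]) - 3*j), cs[1]] + go(cs[2:], j + 1)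
--     return ''.join(go(list(string), 0))
-- ===== Notes on version B (the rewrite author's own statement) =====
-- stated objective: alternative
-- what changed: Replaces the indexed loop with per-character i%2 branching and i//2 arithmetic by a structural recursion that consumes two characters per step while tracking the pair counter j.
import Mathlib
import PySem

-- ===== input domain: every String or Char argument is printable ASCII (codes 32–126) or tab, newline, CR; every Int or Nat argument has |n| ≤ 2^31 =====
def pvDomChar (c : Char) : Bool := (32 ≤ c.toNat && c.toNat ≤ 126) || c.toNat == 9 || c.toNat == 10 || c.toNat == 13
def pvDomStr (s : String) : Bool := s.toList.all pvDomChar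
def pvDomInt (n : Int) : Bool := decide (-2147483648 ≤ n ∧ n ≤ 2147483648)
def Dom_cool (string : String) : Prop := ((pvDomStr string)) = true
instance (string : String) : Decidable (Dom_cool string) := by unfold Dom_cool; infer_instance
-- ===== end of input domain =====

-- B replaces the indexed loop with i%2 branching and i//2 arithmetic by a recursion consuming two characters per step; alternative decomposition, same cost.

-- ===== PORT A =====
-- chr(n): exact for 0 ≤ n < 0x110000 (Pre_cool guarantees 0 ≤ n ≤ 126 here; Python raises ValueError on negative n)
def pyChr (n : Int) : Char := Char.ofNat n.toNat

def cool (string : String) : String :=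
  String.ofList ((PySem.List.pyRange 0 (PySem.Str.len string) 1).foldl
    (fun s i =>
      if PySem.Int.mod i 2 = 0 then
        s ++ [pyChr (((PySem.List.pyGetD string.toList i ' ').toNat : Int) - 3 * PySem.Int.floordiv i 2)]
      else
        s ++ [PySem.List.pyGetD string.toList i ' '])
    [])

-- ===== PORT B =====
-- go(cs, j) from Source B: structural recursion, two characters per step, pair counter j
def coolGo : List Char → Int → List Char
  | [], _ => []
  | [c], j => [pyChr ((c.toNat : Int) - 3 * j)]
  | a :: b :: cs, j => [pyChr ((a.toNat : Int) - 3 * j), b] ++ coolGo cs (j + 1)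

def cool_alt (string : String) : String :=
  String.ofList (coolGo string.toList 0)

-- ===== PRECONDITION & SPEC =====
-- Pre_cool holds exactly when chr never sees a negative code, i.e. Python A (and B alike) return
-- normally; outside it both raise ValueError.
def Pre_cool (string : String) : Prop :=
  (string.toList.zipIdx.all fun p =>
    decide (p.2 % 2 = 1) || decide (3 * (p.2 / 2) ≤ p.1.toNat)) = true
instance (string : String) : Decidable (Pre_cool string) := by unfold Pre_cool; infer_instance

def pvWitness_cool : String := "hello"

def Spec_cool (string : String) (out : String) : Prop := out = cool_alt string
instance (string : String) (out : String) : Decidable (Spec_cool string out) := by unfold Spec_cool; infer_instance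

-- ===== CLAIM (what is proved, stated in full; the proofs are below) =====
def Claim_equal_cool : Prop := ∀ (string : String), Dom_cool string → Pre_cool string → Spec_cool string (cool string)

-- ===== LEMMAS AND PROOFS =====

-- a fold that appends one character per step is a map
theorem foldl_snoc {α : Type} (l : List α) (g : α → Char) (acc : List Char) :
    l.foldl (fun s k => s ++ [g k]) acc = acc ++ l.map g := by
  induction l generalizing acc with
  | nil => simp
  | cons x xs ih => simp [List.foldl_cons, ih]

-- characterisation of B's recursion: element k of the result, pair counter offset j
theorem coolGo_eq_map (cs : List Char) (j : Int) :
    coolGo cs j = (List.range cs.length).map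
      (fun k => if k % 2 = 0
        then pyChr (((cs.getD k ' ').toNat : Int) - 3 * (j + (k / 2 : Nat)))
        else cs.getD k ' ') := by
  induction cs, j using coolGo.induct with
  | case1 j => simp [coolGo]
  | case2 c j => simp [coolGo]
  | case3 a b cs j ih =>
    simp only [coolGo, List.length_cons, List.range_succ_eq_map, List.map_cons, List.map_map, ih,
      List.cons_append, List.nil_append, List.cons.injEq]
    refine ⟨by norm_num, by norm_num, ?_⟩
    apply List.map_congr_left
    intro k _
    simp only [Function.comp, List.getD_cons_succ]
    have h1 : (k + 1 + 1) % 2 = k % 2 := by omega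
    have h2 : (k + 1 + 1) / 2 = k / 2 + 1 := by omega
    rw [h1, h2]
    split <;> [skip; rfl]
    congr 1
    push_cast
    ring

theorem cool_eq (string : String) : cool string = cool_alt string := by
  unfold cool cool_alt
  rw [coolGo_eq_map]
  congr 1
  have hbody : (fun (s : List Char) (i : Int) =>
      if PySem.Int.mod i 2 = 0 then
        s ++ [pyChr (((PySem.List.pyGetD string.toList i ' ').toNat : Int) - 3 * PySem.Int.floordiv i 2)]
      else
        s ++ [PySem.List.pyGetD string.toList i ' '])
      = fun s i => s ++ [if PySem.Int.mod i 2 = 0 then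
          pyChr (((PySem.List.pyGetD string.toList i ' ').toNat : Int) - 3 * PySem.Int.floordiv i 2)
        else PySem.List.pyGetD string.toList i ' '] := by
    funext s i; split <;> rfl
  rw [hbody, foldl_snoc, PySem.List.pyRange_one]
  simp only [List.nil_append, List.map_map, PySem.Str.len_eq, Int.sub_zero, Int.toNat_natCast]
  apply List.map_congr_left
  intro k hk
  have hm : PySem.Int.mod (k : Int) 2 = (k : Int) % 2 :=
    PySem.Int.mod_eq_emod_of_pos (by omega)
  have hf : PySem.Int.floordiv (k : Int) 2 = ((k / 2 : Nat) : Int) := by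
    rw [PySem.Int.floordiv_eq_ediv_of_pos (by omega)]
    exact_mod_cast rfl
  have hcond : ((k : Int) % 2 = 0) ↔ (k % 2 = 0) := by omega
  simp only [Function.comp, zero_add, hm, hf, PySem.List.pyGetD_natCast]
  by_cases h : k % 2 = 0
  · rw [if_pos (hcond.mpr h), if_pos h]
  · rw [if_neg (fun hh => h (hcond.mp hh)), if_neg h]

-- ===== VERDICT (by name: the statement is the Claim_ definition above) =====
theorem cool_spec : Claim_equal_cool := by
  intro string _ _
  unfold Spec_cool
  exact cool_eq string
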